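-- pv_equiv track=rewrite | github.com/SamZhang02/SecondBrain | src/dubhack/services/concept_populator.py | _group_documents_by_concept
-- ===== SOURCE A (Python) =====
-- from collections.abc import Iterable, Mapping, Sequence
--
-- Concept = str
--
-- def _group_documents_by_concept(
--     concept_map: Mapping[str, Sequence[str]],
-- ) -> dict[Concept, list[str]]:
--     index: dict[Concept, list[str]] = {}
--     for document, keywords in concept_map.items():
--         if not keywords:
--             continue
--         for keyword in keywords:
--             if not keyword:
--                 continue
--             docs = index.setdefault(keyword, [])
--             if document not in docs:
--                 docs.append(document)
--     return index
-- ===== SOURCE B (Python) =====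
-- def _group_documents_by_concept(concept_map):
--     # pass 1: distinct non-empty keywords in first-appearance order
--     order = []
--     for keywords in concept_map.values():
--         for keyword in keywords:
--             if keyword and keyword not in order:
--                 order.append(keyword)
--     # pass 2: for each keyword, the documents mentioning it, deduplicated in order
--     return {
--         keyword: list(dict.fromkeys(
--             document
--             for document, keywords in concept_map.items()
--             if keyword in keywords
--         ))
--         for keyword in order
--     }
-- ===== Notes on version B (the rewrite author's own statement) =====
-- stated objective: alternative
-- what changed: B replaces A's single incremental pass (growing a dict and appending each document with an in-list dedup check) by two separate passes: first collect the distinct non-empty keywords in first-appearance order, then for each keyword re-scan the whole map and group the documents mentioning it, deduplicated via dict.fromkeys.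
import Mathlib
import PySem

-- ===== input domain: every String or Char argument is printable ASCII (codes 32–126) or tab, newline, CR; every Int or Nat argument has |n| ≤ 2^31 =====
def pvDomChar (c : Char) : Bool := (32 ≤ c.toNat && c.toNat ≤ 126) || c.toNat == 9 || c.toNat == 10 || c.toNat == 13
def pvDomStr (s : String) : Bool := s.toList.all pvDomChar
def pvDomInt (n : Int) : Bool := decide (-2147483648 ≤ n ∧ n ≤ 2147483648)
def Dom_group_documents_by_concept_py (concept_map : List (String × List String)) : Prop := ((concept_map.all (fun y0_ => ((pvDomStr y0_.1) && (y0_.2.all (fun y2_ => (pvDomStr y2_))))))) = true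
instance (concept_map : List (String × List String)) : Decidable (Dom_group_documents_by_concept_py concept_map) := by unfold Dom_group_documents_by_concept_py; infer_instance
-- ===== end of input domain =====

-- B inverts the map with two separate passes (collect the keyword order, then group per
-- keyword by re-scanning the documents) instead of A's single incremental append-with-dedup
-- pass over a growing dict; objective: alternative decomposition, same result.

-- ===== PORT A =====
-- body of A's inner 'for keyword in keywords' loop (setdefault, then append if absent)
def pvAkwStep (document : String) (index : PySem.Dict String (List String))
    (keyword : String) : PySem.Dict String (List String) :=
  if keyword = "" then index
  else
    let index' := index.setdefault keyword []
    let docs := index'.getD keyword []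
    if document ∈ docs then index' else index'.insert keyword (docs ++ [document])

def group_documents_by_concept_py (concept_map : List (String × List String)) :
    List (String × List String) :=
  (concept_map.foldl
    (fun index p => if p.2.isEmpty then index else p.2.foldl (pvAkwStep p.1) index)
    PySem.Dict.empty).items

-- ===== PORT B =====
-- pass 1: distinct non-empty keywords in first-appearance order
def pvBorder (concept_map : List (String × List String)) : List String :=
  concept_map.foldl
    (fun order p =>
      p.2.foldl (fun order kw => if kw ≠ "" ∧ kw ∉ order then order ++ [kw] else order) order)
    []

-- pass 2 body: documents mentioning the keyword, deduplicated in order (dict.fromkeys)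
def pvBdocs (concept_map : List (String × List String)) (keyword : String) : List String :=
  PySem.List.dedup
    (concept_map.filterMap (fun p => if keyword ∈ p.2 then some p.1 else none))

def group_documents_by_concept_py_alt (concept_map : List (String × List String)) :
    List (String × List String) :=
  (pvBorder concept_map).map (fun kw => (kw, pvBdocs concept_map kw))

-- ===== PRECONDITION & SPEC =====
def Spec_group_documents_by_concept_py (concept_map : List (String × List String)) (out : List (String × List String)) : Prop := out = group_documents_by_concept_py_alt concept_map
instance (concept_map : List (String × List String)) (out : List (String × List String)) : Decidable (Spec_group_documents_by_concept_py concept_map out) := by unfold Spec_group_documents_by_concept_py; infer_instance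

-- ===== CLAIM (what is proved, stated in full; the proofs are below) =====
def Claim_equal_group_documents_by_concept_py : Prop := ∀ (concept_map : List (String × List String)), Dom_group_documents_by_concept_py concept_map → Spec_group_documents_by_concept_py concept_map (group_documents_by_concept_py concept_map)

-- ===== LEMMAS AND PROOFS =====

-- A's dict after the outer loop (port A is its .items)
def pvAfold (concept_map : List (String × List String)) : PySem.Dict String (List String) :=
  concept_map.foldl
    (fun index p => if p.2.isEmpty then index else p.2.foldl (pvAkwStep p.1) index)
    PySem.Dict.empty

-- B's keyword-collection step, named for the proofs
def pvOrderStep (order : List String) (kw : String) : List String :=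
  if kw ≠ "" ∧ kw ∉ order then order ++ [kw] else order

lemma pvSetdefault_eq (d : PySem.Dict String (List String)) (k : String) (v : List String) :
    d.setdefault k v = if d.contains k then d else d.insert k v := by
  by_cases h : d.contains k
  · simp [PySem.Dict.setdefault, h]
  · simp only [PySem.Dict.setdefault, h, Bool.false_eq_true, if_false]
    apply PySem.Dict.ext
    rw [PySem.Dict.items_insert_of_not_contains d v (by simpa using h)]

lemma pvStep_getD (d : PySem.Dict String (List String)) (doc k k' : String) :
    (pvAkwStep doc d k).getD k' [] =
      if k' = k ∧ k ≠ "" then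
        (if doc ∈ d.getD k [] then d.getD k [] else d.getD k [] ++ [doc])
      else d.getD k' [] := by
  simp only [pvAkwStep]
  rw [pvSetdefault_eq]
  by_cases hk : k = ""
  · simp [hk]
  · rw [if_neg hk]
    by_cases hc : d.contains k
    · rw [if_pos hc]
      by_cases hd : doc ∈ d.getD k []
      · rw [if_pos hd]
        by_cases hk' : k' = k <;> simp [hk', hk, hd]
      · rw [if_neg hd, PySem.Dict.getD_insert]
        by_cases hk' : k' = k <;> simp [hk', hk, hd]
    · have hcf : d.contains k = false := by simpa using hc
      have h0 : d.getD k [] = [] := PySem.Dict.getD_of_not_contains d [] hcf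
      have hdocs : (d.insert k []).getD k ([] : List String) = [] := by
        rw [PySem.Dict.getD_insert]; simp
      rw [if_neg hc, hdocs]
      simp only [List.not_mem_nil, if_false, List.nil_append]
      rw [PySem.Dict.insert_insert_self, PySem.Dict.getD_insert]
      by_cases hk' : k' = k <;> simp [hk', hk, h0]

lemma pvStep_keys (d : PySem.Dict String (List String)) (doc k : String) :
    (pvAkwStep doc d k).keys = pvOrderStep d.keys k := by
  unfold pvAkwStep pvOrderStep
  rw [pvSetdefault_eq]
  by_cases hk : k = ""
  · simp [hk]
  · rw [if_neg hk]
    by_cases hc : d.contains k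
    · have hm : k ∈ d.keys := (PySem.Dict.contains_iff_mem_keys _ _).mp hc
      rw [if_pos hc]
      by_cases hd : doc ∈ d.getD k []
      · simp [hd, hk, hm]
      · rw [if_neg hd, PySem.Dict.keys_insert_of_contains d _ hc]
        simp [hk, hm]
    · have hcf : d.contains k = false := by simpa using hc
      have hm : k ∉ d.keys := fun h => hc ((PySem.Dict.contains_iff_mem_keys _ _).mpr h)
      have hdocs : (d.insert k []).getD k ([] : List String) = [] := by
        rw [PySem.Dict.getD_insert]; simp
      rw [if_neg hc]
      simp only [hdocs, List.not_mem_nil, if_false]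
      rw [PySem.Dict.insert_insert_self,
        PySem.Dict.keys_insert_of_not_contains d _ hcf]
      simp [hk, hm]

lemma pvInner_keys (kws : List String) (doc : String) :
    ∀ d : PySem.Dict String (List String),
      (kws.foldl (pvAkwStep doc) d).keys = kws.foldl pvOrderStep d.keys := by
  induction kws with
  | nil => intro d; rfl
  | cons k rest ih =>
      intro d
      simp only [List.foldl_cons]
      rw [ih, pvStep_keys]

lemma pvInner_nodup (kws : List String) (doc : String) :
    ∀ d : PySem.Dict String (List String), d.keys.Nodup →
      (kws.foldl (pvAkwStep doc) d).keys.Nodup := by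
  induction kws with
  | nil => intro d h; exact h
  | cons k rest ih =>
      intro d h
      simp only [List.foldl_cons]
      refine ih _ ?_
      rw [pvStep_keys]
      unfold pvOrderStep
      split_ifs with hcond
      · refine List.Nodup.append h (by simp) ?_
        intro a ha hb
        simp only [List.mem_singleton] at hb
        exact hcond.2 (hb ▸ ha)
      · exact h

lemma pvInner_getD (kws : List String) (doc kw : String) (hkw : kw ≠ "") :
    ∀ d : PySem.Dict String (List String),
      (kws.foldl (pvAkwStep doc) d).getD kw [] =
        if kw ∈ kws then
          (if doc ∈ d.getD kw [] then d.getD kw [] else d.getD kw [] ++ [doc])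
        else d.getD kw [] := by
  induction kws with
  | nil => intro d; simp
  | cons k rest ih =>
      intro d
      simp only [List.foldl_cons]
      rw [ih]
      by_cases hk : kw = k
      · subst hk
        have h1 : (pvAkwStep doc d kw).getD kw [] =
            (if doc ∈ d.getD kw [] then d.getD kw [] else d.getD kw [] ++ [doc]) := by
          rw [pvStep_getD]; simp [hkw]
        have hmem : doc ∈ (if doc ∈ d.getD kw [] then d.getD kw [] else d.getD kw [] ++ [doc]) := by
          split_ifs with h <;> simp [h]
        by_cases hr : kw ∈ rest
        · simp [hr, h1, hmem]
        · simp [hr, h1]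
      · have h1 : (pvAkwStep doc d k).getD kw [] = d.getD kw [] := by
          rw [pvStep_getD]; simp [hk]
        rw [h1]
        by_cases hr : kw ∈ rest <;> simp [hr, hk]

lemma pvOrder_ne_empty (kws : List String) :
    ∀ acc : List String, (∀ k ∈ acc, k ≠ "") →
      ∀ k ∈ kws.foldl pvOrderStep acc, k ≠ "" := by
  induction kws with
  | nil => intro acc h; exact h
  | cons k rest ih =>
      intro acc h
      simp only [List.foldl_cons]
      refine ih _ ?_
      intro x hx
      unfold pvOrderStep at hx
      split_ifs at hx with hcond
      · rcases List.mem_append.mp hx with h1 | h1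
        · exact h _ h1
        · simp only [List.mem_singleton] at h1; subst h1; exact hcond.1
      · exact h _ hx

lemma pvMain (concept_map : List (String × List String)) :
    (pvAfold concept_map).keys = pvBorder concept_map ∧
    (pvAfold concept_map).keys.Nodup ∧
    ∀ kw, kw ≠ "" → (pvAfold concept_map).getD kw [] = pvBdocs concept_map kw := by
  induction concept_map using List.reverseRecOn with
  | nil =>
      have h0 : pvAfold [] = PySem.Dict.empty := rfl
      refine ⟨rfl, by rw [h0]; simp [PySem.Dict.empty, PySem.Dict.keys], ?_⟩
      intro kw _
      rw [h0, PySem.Dict.getD_empty]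
      rfl
  | append_singleton cm x ih =>
      obtain ⟨ihk, ihn, ihg⟩ := ih
      have hfold : pvAfold (cm ++ [x]) =
          if x.2.isEmpty then pvAfold cm else x.2.foldl (pvAkwStep x.1) (pvAfold cm) := by
        unfold pvAfold; rw [List.foldl_append]; rfl
      have horder : pvBorder (cm ++ [x]) = x.2.foldl pvOrderStep (pvBorder cm) := by
        unfold pvBorder pvOrderStep; rw [List.foldl_append]; rfl
      have hdocs : ∀ kw, pvBdocs (cm ++ [x]) kw =
          if kw ∈ x.2 then
            (if x.1 ∈ pvBdocs cm kw then pvBdocs cm kw else pvBdocs cm kw ++ [x.1])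
          else pvBdocs cm kw := by
        intro kw
        unfold pvBdocs
        rw [List.filterMap_append]
        by_cases hm : kw ∈ x.2
        · simp only [List.filterMap_cons, List.filterMap_nil, hm, if_pos]
          rw [PySem.List.dedup_eq_ofList, PySem.List.dedup_eq_ofList,
            PySem.Set.ofList_append_singleton, PySem.Set.add_eq_ite]
        · simp [hm]
      by_cases he : x.2.isEmpty
      · have hx2 : x.2 = [] := List.isEmpty_iff.mp he
        rw [hfold, if_pos he, horder, hx2]
        refine ⟨ihk, ihn, ?_⟩
        intro kw hkw
        rw [hdocs kw, hx2]
        simp [ihg kw hkw]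
      · rw [hfold, if_neg he, horder]
        refine ⟨?_, pvInner_nodup _ _ _ ihn, ?_⟩
        · rw [pvInner_keys, ihk]
        · intro kw hkw
          rw [pvInner_getD _ _ _ hkw, hdocs kw, ihg kw hkw]

theorem pv_eq (concept_map : List (String × List String)) :
    group_documents_by_concept_py concept_map = group_documents_by_concept_py_alt concept_map := by
  obtain ⟨hk, hn, hg⟩ := pvMain concept_map
  have hitems : group_documents_by_concept_py concept_map =
      (pvAfold concept_map).keys.map (fun k => (k, (pvAfold concept_map).getD k [])) :=
    PySem.Dict.items_eq_map_keys _ hn []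
  rw [hitems, hk]
  unfold group_documents_by_concept_py_alt
  apply List.map_congr_left
  intro kw hkw
  have hne : kw ≠ "" := by
    have : ∀ k ∈ pvBorder concept_map, k ≠ "" := by
      unfold pvBorder
      -- pvBorder is a double fold; flatten via the same step function
      have : ∀ cm : List (String × List String), ∀ acc : List String,
          (∀ k ∈ acc, k ≠ "") →
          ∀ k ∈ cm.foldl (fun order p => p.2.foldl pvOrderStep order) acc, k ≠ "" := by
        intro cm
        induction cm with
        | nil => intro acc h; exact h
        | cons p rest ih =>
            intro acc h
            simp only [List.foldl_cons]
            exact ih _ (pvOrder_ne_empty _ _ h)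
      exact fun k hkmem => this concept_map [] (by simp) k hkmem
    exact this kw hkw
  rw [hg kw hne]

-- ===== VERDICT (by name: the statement is the Claim_ definition above) =====
theorem group_documents_by_concept_py_spec : Claim_equal_group_documents_by_concept_py := by
  intro concept_map _
  unfold Spec_group_documents_by_concept_py
  exact pv_eq concept_map
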